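-- pv_equiv track=rewrite | github.com/Preet28/AI_Algorithms | cryptoarithmetic.py | is_valid_cryptarithmetic_problem
-- ===== SOURCE A (Python) =====
-- def is_valid_cryptarithmetic_problem(problem):
--   """
--   Checks if the given problem is a valid cryptarithmetic problem.
--
--   Args:
--     problem: The problem to check.
--
--   Returns:
--     True if the problem is valid, False otherwise.
--   """
--
--   # Check if the problem has the correct number of digits.
--   digits = set()
--   for letter in problem:
--     if letter.isdigit():
--       digits.add(letter)
--   if len(digits) != 3:
--     return False
--
--   # Check if the problem has no duplicate letters.
--   seen_letters = set()
--   for letter in problem: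
--     if letter.isalpha():
--       if letter in seen_letters:
--         return False
--       seen_letters.add(letter)
--
--   # Check if the problem is solvable.
--   for digit in digits:
--     if problem.count(digit) > 1:
--       return False
--
--   return True
-- ===== SOURCE B (Python) =====
-- def is_valid_cryptarithmetic_problem(problem):
--   """
--   Checks if the given problem is a valid cryptarithmetic problem.
--
--   Sort-then-scan: sort the alphanumeric characters so duplicates become
--   adjacent, then one scan over the sorted run rejects any adjacent equal
--   pair and counts the digit characters; valid iff exactly 3 digits remain.
--   """
--   chars = sorted(c for c in problem if c.isalpha() or c.isdigit())
--   prev = None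
--   distinct_digits = 0
--   for c in chars:
--     if c == prev:
--       return False
--     if c.isdigit():
--       distinct_digits += 1
--     prev = c
--   return distinct_digits == 3
-- ===== Notes on version B (the rewrite author's own statement) =====
-- stated objective: alternative
-- what changed: Replaces A's three separate scans (digit-set build, seen-set duplicate-letter scan, and a per-digit problem.count rescan) with sort-then-scan: sort the alphanumeric characters so duplicates are adjacent, then a single adjacent-pair scan that simultaneously rejects duplicates and counts digits.
import Mathlib
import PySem

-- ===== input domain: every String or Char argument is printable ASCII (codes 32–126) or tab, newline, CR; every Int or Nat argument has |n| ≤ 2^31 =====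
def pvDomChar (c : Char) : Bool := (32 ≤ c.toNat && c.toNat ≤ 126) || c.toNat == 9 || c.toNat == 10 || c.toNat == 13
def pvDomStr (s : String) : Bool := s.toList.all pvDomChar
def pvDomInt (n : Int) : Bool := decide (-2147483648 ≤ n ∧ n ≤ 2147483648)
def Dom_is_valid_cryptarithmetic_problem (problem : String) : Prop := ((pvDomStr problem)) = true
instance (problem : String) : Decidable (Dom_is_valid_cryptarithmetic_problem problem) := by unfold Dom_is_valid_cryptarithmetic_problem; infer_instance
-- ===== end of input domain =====

-- B replaces A's three separate scans with sort-then-scan: sort the alphanumeric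
-- characters so duplicates are adjacent, then one adjacent-pair scan rejects
-- duplicates and counts the digits (objective: alternative algorithm).

-- ===== PORT A =====
-- second loop of A: early return False on a duplicate alphabetic character
def pvCheckLetters : List Char → PySem.Set Char → Bool
  | [], _ => true
  | c :: rest, seen =>
    if PySem.Chars.isalpha c then
      if PySem.Set.contains seen c then false
      else pvCheckLetters rest (PySem.Set.add seen c)
    else pvCheckLetters rest seen

-- third loop of A: early return False on a digit occurring more than once
def pvCheckDigits (problem : String) : List Char → Bool
  | [] => true
  | d :: rest =>
    if PySem.Str.count problem (String.ofList [d]) > 1 then false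
    else pvCheckDigits problem rest

def is_valid_cryptarithmetic_problem (problem : String) : Bool :=
  let digits : PySem.Set Char :=
    problem.toList.foldl
      (fun ds c => if PySem.Chars.isdigit c then PySem.Set.add ds c else ds)
      PySem.Set.empty
  if PySem.Set.len digits ≠ 3 then false
  else if pvCheckLetters problem.toList PySem.Set.empty = false then false
  else pvCheckDigits problem digits

-- ===== PORT B =====
-- B's single scan over the sorted alphanumeric characters: early False on an
-- adjacent duplicate, count the digit characters, and compare with 3 at the end
def pvScanB : Option Char → Int → List Char → Bool
  | _, k, [] => k == 3
  | prev, k, c :: rest =>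
    if some c == prev then false
    else pvScanB (some c) (if PySem.Chars.isdigit c then k + 1 else k) rest

def is_valid_cryptarithmetic_problem_alt (problem : String) : Bool :=
  let chars : List Char :=
    PySem.List.sorted
      (problem.toList.filter (fun c => PySem.Chars.isalpha c || PySem.Chars.isdigit c))
      (fun c => c) false
  pvScanB none 0 chars

-- ===== PRECONDITION & SPEC =====
def Spec_is_valid_cryptarithmetic_problem (problem : String) (out : Bool) : Prop := out = is_valid_cryptarithmetic_problem_alt problem
instance (problem : String) (out : Bool) : Decidable (Spec_is_valid_cryptarithmetic_problem problem out) := by unfold Spec_is_valid_cryptarithmetic_problem; infer_instance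

-- ===== CLAIM (what is proved, stated in full; the proofs are below) =====
def Claim_equal_is_valid_cryptarithmetic_problem : Prop := ∀ (problem : String), Dom_is_valid_cryptarithmetic_problem problem → Spec_is_valid_cryptarithmetic_problem problem (is_valid_cryptarithmetic_problem problem)

-- ===== LEMMAS AND PROOFS =====

-- Chars.count on a singleton pattern is List.count
theorem pv_count_go_singleton (c : Char) :
    ∀ (fuel : Nat) (l : List Char) (acc : Nat), l.length ≤ fuel →
      PySem.Chars.count.go [c] fuel l acc = acc + l.count c := by
  intro fuel
  induction fuel with
  | zero =>
    intro l acc h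
    have : l = [] := List.length_eq_zero_iff.mp (Nat.le_zero.mp h)
    subst this
    simp [PySem.Chars.count.go]
  | succ n ih =>
    intro l acc h
    cases l with
    | nil => simp [PySem.Chars.count.go]
    | cons x t =>
      simp only [PySem.Chars.count.go]
      by_cases hx : c = x
      · subst hx
        have hpre : [c].isPrefixOf (c :: t) = true := by simp [List.isPrefixOf]
        simp only [hpre, if_true]
        have hdrop : List.drop ([c].length) (c :: t) = t := by simp
        rw [hdrop]
        rw [ih t (acc + 1) (by simp at h; omega)]
        simp
        omega
      · have hpre : [c].isPrefixOf (x :: t) = false := by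
          simp [List.isPrefixOf]
          intro hxx
          exact hx hxx
        simp only [hpre, Bool.false_eq_true, if_false]
        rw [ih t acc (by simp at h; omega)]
        have hcc : List.count c (x :: t) = List.count c t := by
          simp [List.count_cons]
          intro hxx
          first | exact hx hxx | exact hx hxx.symm
        rw [hcc]

theorem pv_count_single (s : List Char) (c : Char) :
    PySem.Chars.count s [c] = s.count c := by
  simp only [PySem.Chars.count, List.isEmpty_cons, if_false, Bool.false_eq_true]
  simpa using pv_count_go_singleton c s.length s 0 (le_refl _)

-- building the set of elements satisfying p is filtering the set of all elements
theorem pv_ofList_filter (p : Char → Bool) (xs : List Char) :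
    PySem.Set.ofList (xs.filter p) = (PySem.Set.ofList xs).filter p := by
  induction xs using List.reverseRecOn with
  | nil => simp [PySem.Set.ofList, PySem.Set.empty]
  | append_singleton xs x ih =>
    have hof : ∀ (ys : List Char), PySem.Set.ofList (ys ++ [x]) = PySem.Set.add (PySem.Set.ofList ys) x := by
      intro ys; simp [PySem.Set.ofList, List.foldl_append]
    by_cases hp : p x = true
    · rw [List.filter_append, show List.filter p [x] = [x] by simp [hp], hof, hof, ih]
      simp only [PySem.Set.add, PySem.Set.contains]
      by_cases hx : x ∈ xs
      · have h1 : x ∈ PySem.Set.ofList xs := (PySem.Set.mem_ofList xs x).mpr hx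
        simp [h1, List.mem_filter, hp]
      · have h1 : x ∉ PySem.Set.ofList xs := fun h => hx ((PySem.Set.mem_ofList xs x).mp h)
        simp [h1, List.mem_filter, List.filter_append, hp]
    · rw [List.filter_append, show List.filter p [x] = [] by simp [hp], List.append_nil, ih, hof]
      simp only [PySem.Set.add, PySem.Set.contains]
      by_cases h1 : x ∈ PySem.Set.ofList xs
      · simp [h1]
      · simp [h1, List.filter_append, hp]

-- A's duplicate-letter loop succeeds iff the alphabetic characters are pairwise distinct and unseen
theorem pv_checkLetters_iff :
    ∀ (xs : List Char) (seen : PySem.Set Char),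
      pvCheckLetters xs seen = true ↔
        ((xs.filter PySem.Chars.isalpha).Nodup ∧
          ∀ c ∈ seen, c ∉ xs.filter PySem.Chars.isalpha) := by
  intro xs
  induction xs with
  | nil => intro seen; simp [pvCheckLetters]
  | cons c rest ih =>
    intro seen
    by_cases ha : PySem.Chars.isalpha c = true
    · simp only [pvCheckLetters, ha, if_true]
      by_cases hs : PySem.Set.contains seen c = true
      · have hmem : c ∈ seen := by simpa [PySem.Set.contains] using hs
        simp only [hs, if_true]
        constructor
        · intro h; cases h
        · rintro ⟨-, hdisj⟩
          exact absurd (by simp [ha]) (hdisj c hmem)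
      · have hmem : c ∉ seen := by simpa [PySem.Set.contains] using hs
        simp only [hs, Bool.false_eq_true, if_false]
        rw [ih]
        have hadd : PySem.Set.add seen c = seen ++ [c] := by
          simp [PySem.Set.add, PySem.Set.contains, hmem]
        rw [hadd]
        simp only [List.filter_cons, ha, if_true, List.nodup_cons]
        constructor
        · rintro ⟨hnd, hdisj⟩
          refine ⟨⟨?_, hnd⟩, ?_⟩
          · exact hdisj c (by simp)
          · intro d hd
            simp only [List.mem_cons]
            rintro (rfl | hdm)
            · exact hmem hd
            · exact hdisj d (by simp [hd]) hdm
        · rintro ⟨⟨hcn, hnd⟩, hdisj⟩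
          refine ⟨hnd, ?_⟩
          intro d hd
          rcases List.mem_append.mp hd with hd1 | hd2
          · exact fun hdm => hdisj d hd1 (by simp [hdm])
          · simp only [List.mem_singleton] at hd2
            subst hd2
            exact hcn
    · simp only [pvCheckLetters, ha, Bool.false_eq_true, if_false]
      rw [ih]
      simp [ha]

-- A's per-digit rescan loop as a universally quantified count bound
theorem pv_checkDigits_iff (problem : String) :
    ∀ (ds : List Char),
      pvCheckDigits problem ds = true ↔ ∀ d ∈ ds, problem.toList.count d ≤ 1 := by
  intro ds
  induction ds with
  | nil => simp [pvCheckDigits]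
  | cons d rest ih =>
    simp only [pvCheckDigits]
    have hcnt : PySem.Str.count problem (String.ofList [d]) = problem.toList.count d := by
      show PySem.Chars.count problem.toList (String.ofList [d]).toList = _
      rw [String.toList_ofList, pv_count_single]
    rw [hcnt]
    by_cases h1 : problem.toList.count d > 1
    · simp only [h1, if_true]
      constructor
      · intro h; cases h
      · intro h
        exact absurd (h d (by simp)) (by omega)
    · simp only [h1, if_false]
      rw [ih]
      constructor
      · intro h
        intro e he
        rcases List.mem_cons.mp he with rfl | hm
        · omega
        · exact h e hm
      · intro h e he
        exact h e (by simp [he])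

-- B's scan loop: no adjacent duplicate, and the digit tally reaches exactly 3
theorem pv_scanB_iff :
    ∀ (ys : List Char) (prev : Option Char) (k : Int),
      pvScanB prev k ys = true ↔
        (List.IsChain (· ≠ ·) (prev.toList ++ ys) ∧
          k + ((ys.countP (fun c => PySem.Chars.isdigit c) : Nat) : Int) = 3) := by
  intro ys
  induction ys with
  | nil =>
    intro prev k
    have hch : List.IsChain (· ≠ ·) (prev.toList) := by
      cases prev with
      | none => exact List.isChain_nil
      | some p => exact List.isChain_singleton p
    simp [pvScanB, hch]
  | cons c rest ih =>
    intro prev k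
    by_cases hdup : some c = prev
    · subst hdup
      have hch : ¬ List.IsChain (· ≠ ·) ((some c).toList ++ (c :: rest)) := by
        simp [List.isChain_cons_cons]
      simp only [pvScanB, BEq.rfl, if_true]
      simp
    · have hne : (some c == prev) = false := by
        cases prev with
        | none => rfl
        | some p =>
          simp only [beq_eq_false_iff_ne, ne_eq]
          exact hdup
      simp only [pvScanB, hne, Bool.false_eq_true, if_false]
      rw [ih]
      have hch : List.IsChain (· ≠ ·) (prev.toList ++ (c :: rest)) ↔
          List.IsChain (· ≠ ·) ((some c).toList ++ rest) := by
        cases prev with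
        | none => simp
        | some p =>
          simp only [Option.toList, List.cons_append, List.nil_append,
            List.isChain_cons_cons]
          constructor
          · rintro ⟨-, h⟩; exact h
          · intro h
            exact ⟨fun hpc => hdup (by rw [hpc]), h⟩
      rw [hch]
      constructor
      · rintro ⟨h1, h2⟩
        refine ⟨h1, ?_⟩
        by_cases hdig : PySem.Chars.isdigit c = true
        · simp only [hdig, if_true] at h2
          simp only [List.countP_cons, hdig, if_true]
          push_cast at h2 ⊢
          omega
        · simp only [hdig, Bool.false_eq_true, if_false] at h2
          simp only [List.countP_cons, hdig, Bool.false_eq_true, if_false]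
          exact h2
      · rintro ⟨h1, h2⟩
        refine ⟨h1, ?_⟩
        by_cases hdig : PySem.Chars.isdigit c = true
        · simp only [List.countP_cons, hdig, if_true] at h2
          simp only [hdig, if_true]
          push_cast at h2 ⊢
          omega
        · simp only [List.countP_cons, hdig, Bool.false_eq_true, if_false] at h2
          simp only [hdig, Bool.false_eq_true, if_false]
          exact h2

-- in a ≤-sorted list, no adjacent duplicates means no duplicates at all
theorem pv_nodup_of_isChain_ne :
    ∀ (ys : List Char), ys.Pairwise (· ≤ ·) → List.IsChain (· ≠ ·) ys → ys.Nodup := by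
  intro ys
  induction ys with
  | nil => intro _ _; exact List.nodup_nil
  | cons a t ih =>
    intro hpw hch
    rcases List.pairwise_cons.mp hpw with ⟨hale, hpwt⟩
    refine List.nodup_cons.mpr ⟨?_, ih hpwt hch.tail⟩
    cases t with
    | nil => simp
    | cons b u =>
      have hab : a ≠ b := (List.isChain_cons_cons.mp hch).1
      have haltb : a < b := lt_of_le_of_ne (hale b (by simp)) hab
      intro hmem
      rcases List.mem_cons.mp hmem with rfl | hmu
      · exact hab rfl
      · have hble : b ≤ a := (List.pairwise_cons.mp hpwt).1 a hmu
        exact absurd (lt_of_lt_of_le haltb hble) (lt_irrefl a)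

-- the shared characterisation both programs reduce to, phrased on the filtered list
theorem pv_key_iff (xs : List Char) :
    (((PySem.Set.ofList xs).filter (fun c => PySem.Chars.isdigit c)).length = 3 ∧
      (xs.filter PySem.Chars.isalpha).Nodup ∧
      ∀ d ∈ (PySem.Set.ofList xs).filter (fun c => PySem.Chars.isdigit c), xs.count d ≤ 1)
    ↔ ((xs.filter (fun c => PySem.Chars.isalpha c || PySem.Chars.isdigit c)).Nodup ∧
        (xs.filter (fun c => PySem.Chars.isalpha c || PySem.Chars.isdigit c)).countP
          (fun c => PySem.Chars.isdigit c) = 3) := by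
  set fil := xs.filter (fun c => PySem.Chars.isalpha c || PySem.Chars.isdigit c) with hfil
  set D := (PySem.Set.ofList xs).filter (fun c => PySem.Chars.isdigit c) with hD
  have hDnd : D.Nodup := (PySem.Set.nodup_ofList xs).filter _
  have hmemD : ∀ c, c ∈ D ↔ (c ∈ xs ∧ PySem.Chars.isdigit c = true) := by
    intro c
    rw [hD, List.mem_filter, PySem.Set.mem_ofList]
  have hfila : xs.filter PySem.Chars.isalpha = fil.filter PySem.Chars.isalpha := by
    rw [hfil, List.filter_filter]
    apply List.filter_congr
    intro c _
    by_cases h : PySem.Chars.isalpha c = true <;> simp [h]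
  have hfild : xs.filter (fun c => PySem.Chars.isdigit c)
      = fil.filter (fun c => PySem.Chars.isdigit c) := by
    rw [hfil, List.filter_filter]
    apply List.filter_congr
    intro c _
    by_cases h : PySem.Chars.isdigit c = true <;> simp [h]
  have hcp : fil.countP (fun c => PySem.Chars.isdigit c)
      = (xs.filter (fun c => PySem.Chars.isdigit c)).length := by
    rw [hfild, List.countP_eq_length_filter]
  have hmemfd : ∀ c, c ∈ xs.filter (fun c => PySem.Chars.isdigit c) ↔ c ∈ D := by
    intro c
    rw [List.mem_filter, hmemD]
  constructor
  · rintro ⟨hlen, hnda, hdc⟩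
    have hcount : ∀ c, fil.count c ≤ 1 := by
      intro c
      by_cases hin : (PySem.Chars.isalpha c || PySem.Chars.isdigit c) = true
      · have hcf : fil.count c = xs.count c := by
          rw [hfil]; exact List.count_filter hin
        rw [hcf]
        rcases Bool.or_eq_true_iff.mp hin with ha | hd
        · have h2 : (xs.filter PySem.Chars.isalpha).count c = xs.count c :=
            List.count_filter ha
          have h3 := List.nodup_iff_count_le_one.mp hnda c
          rwa [h2] at h3
        · by_cases hx : c ∈ xs
          · exact hdc c ((hmemD c).mpr ⟨hx, hd⟩)
          · rw [List.count_eq_zero.mpr hx]; omega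
      · have hcf : fil.count c = 0 := by
          rw [hfil]; exact List.count_eq_zero.mpr (by simp [List.mem_filter, hin])
        omega
    have hndf : fil.Nodup := List.nodup_iff_count_le_one.mpr hcount
    refine ⟨hndf, ?_⟩
    have hndd : (xs.filter (fun c => PySem.Chars.isdigit c)).Nodup := by
      rw [hfild]; exact hndf.filter _
    have hperm : (xs.filter (fun c => PySem.Chars.isdigit c)).Perm D :=
      (List.perm_ext_iff_of_nodup hndd hDnd).mpr hmemfd
    rw [hcp, hperm.length_eq, hlen]
  · rintro ⟨hndf, hcnt⟩
    have hnda : (xs.filter PySem.Chars.isalpha).Nodup := by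
      rw [hfila]; exact hndf.filter _
    have hndd : (xs.filter (fun c => PySem.Chars.isdigit c)).Nodup := by
      rw [hfild]; exact hndf.filter _
    refine ⟨?_, hnda, ?_⟩
    · have hperm : (xs.filter (fun c => PySem.Chars.isdigit c)).Perm D :=
        (List.perm_ext_iff_of_nodup hndd hDnd).mpr hmemfd
      rw [← hperm.length_eq, ← hcp, hcnt]
    · intro d hd
      rcases (hmemD d).mp hd with ⟨-, hdig⟩
      have h2 : (xs.filter (fun c => PySem.Chars.isdigit c)).count d = xs.count d :=
        List.count_filter hdig
      have h1 := List.nodup_iff_count_le_one.mp hndd d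
      rwa [h2] at h1

-- ===== VERDICT (by name: the statement is the Claim_ definition above) =====
theorem is_valid_cryptarithmetic_problem_spec : Claim_equal_is_valid_cryptarithmetic_problem := by
  intro problem _
  unfold Spec_is_valid_cryptarithmetic_problem
  unfold is_valid_cryptarithmetic_problem is_valid_cryptarithmetic_problem_alt
  set xs := problem.toList with hxs
  -- A's digit set equals the filtered Set
  have hdig :
      (xs.foldl (fun ds c => if PySem.Chars.isdigit c then PySem.Set.add ds c else ds)
          PySem.Set.empty : PySem.Set Char)
        = (PySem.Set.ofList xs).filter (fun c => PySem.Chars.isdigit c) := by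
    rw [show (PySem.Set.empty : PySem.Set Char) = ([] : List Char) from rfl]
    rw [PySem.List.foldl_if_eq_foldl_filter (fun c => PySem.Chars.isdigit c) PySem.Set.add xs []]
    rw [← PySem.Set.ofList_eq_foldl]
    exact pv_ofList_filter _ xs
  simp only [hdig]
  set D := (PySem.Set.ofList xs).filter (fun c => PySem.Chars.isdigit c) with hD
  set fil := xs.filter (fun c => PySem.Chars.isalpha c || PySem.Chars.isdigit c) with hfil
  set ys := PySem.List.sorted fil (fun c => c) false with hys
  have hperm : ys.Perm fil := PySem.List.sorted_perm fil (fun c => c) false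
  have hpw : ys.Pairwise (· ≤ ·) := by
    have := PySem.List.sorted_pairwise fil (fun c => c)
    simpa using this
  rw [Bool.eq_iff_iff]
  rw [pv_scanB_iff]
  simp only [Option.toList, List.nil_append]
  have hBchar :
      (List.IsChain (· ≠ ·) ys ∧
        (0 : Int) + ((ys.countP (fun c => PySem.Chars.isdigit c) : Nat) : Int) = 3)
      ↔ (fil.Nodup ∧ fil.countP (fun c => PySem.Chars.isdigit c) = 3) := by
    constructor
    · rintro ⟨hch, hcnt⟩
      refine ⟨hperm.nodup_iff.mp (pv_nodup_of_isChain_ne ys hpw hch), ?_⟩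
      rw [← hperm.countP_eq]
      omega
    · rintro ⟨hnd, hcnt⟩
      refine ⟨(hperm.nodup_iff.mpr hnd).isChain, ?_⟩
      rw [hperm.countP_eq, hcnt]
      norm_num
  rw [hBchar]
  have hAchar :
      (if PySem.Set.len D ≠ 3 then false
        else if pvCheckLetters xs PySem.Set.empty = false then false
        else pvCheckDigits problem D) = true
      ↔ (D.length = 3 ∧ (xs.filter PySem.Chars.isalpha).Nodup ∧
          ∀ d ∈ D, xs.count d ≤ 1) := by
    split_ifs with h1 h2
    · simp only [false_iff]
      rintro ⟨hl, -, -⟩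
      exact h1 (by simp [PySem.Set.len, hl])
    · simp only [false_iff]
      rintro ⟨-, hnd, -⟩
      have hlt : pvCheckLetters xs PySem.Set.empty = true := by
        rw [pv_checkLetters_iff]
        exact ⟨hnd, by intro c hc; cases hc⟩
      rw [hlt] at h2
      cases h2
    · rw [pv_checkDigits_iff]
      have hl : D.length = 3 := by
        simp only [PySem.Set.len, ne_eq, not_not] at h1
        exact_mod_cast h1
      have hnd : (xs.filter PySem.Chars.isalpha).Nodup := by
        have h2' : pvCheckLetters xs PySem.Set.empty = true := by
          cases h : pvCheckLetters xs PySem.Set.empty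
          · exact absurd h h2
          · rfl
        exact ((pv_checkLetters_iff xs PySem.Set.empty).mp h2').1
      constructor
      · intro h
        exact ⟨hl, hnd, h⟩
      · rintro ⟨-, -, h⟩
        exact h
  rw [hAchar]
  exact pv_key_iff xs
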